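-- pv_equiv track=rewrite | github.com/Din974/My_projects | autoCompletion/main.py | update_word
-- ===== SOURCE A (Python) =====
-- def update_word(res):
--     new = ""
--     for x in range(len(res[0])):
--         if res[0][x].isupper() == True or res[0][x] == ' ' or res[0][x] == '-':
--             new = new + res[0][x].lower()
--         else:
--             break
--     return new
-- ===== SOURCE B (Python) =====
-- def update_word(res):
--     w = res[0]
--     stop = next((k for k, c in enumerate(w)
--                  if not (c.isupper() or c == ' ' or c == '-')), len(w))
--     return w[:stop].lower()
-- ===== Notes on version B (the rewrite author's own statement) =====
-- stated objective: simpler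
-- what changed: B locates the first character that is not uppercase/space/hyphen (next over enumerate, defaulting to len) and lowercases that prefix slice in one bulk operation, instead of A's per-character lowercase-and-concatenate loop with a break.
-- outside the precondition, e.g. on update_word([]): A raises IndexError, B raises IndexError
import Mathlib
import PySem

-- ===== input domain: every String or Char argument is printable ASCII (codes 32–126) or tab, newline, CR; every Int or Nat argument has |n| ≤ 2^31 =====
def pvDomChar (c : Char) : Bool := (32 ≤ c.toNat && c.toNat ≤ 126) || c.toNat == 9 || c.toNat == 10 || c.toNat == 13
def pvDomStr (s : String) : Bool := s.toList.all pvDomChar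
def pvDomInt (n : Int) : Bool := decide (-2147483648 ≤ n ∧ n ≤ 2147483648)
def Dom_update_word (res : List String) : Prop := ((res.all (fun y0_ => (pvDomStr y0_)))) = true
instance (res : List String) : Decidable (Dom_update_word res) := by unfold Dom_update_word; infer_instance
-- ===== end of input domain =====

-- B finds the boundary of the leading uppercase/space/hyphen prefix and lowercases that slice
-- in one bulk operation, replacing A's per-character lowercase-and-concatenate loop; objective: simpler.


-- ===== PORT A =====
-- A's for-loop over range(len(res[0])) with an early break, accumulating
-- new = new + res[0][x].lower() one character at a time.
def updateWordLoopA : List Char → String → String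
  | [], new => new
  | c :: rest, new =>
    if PySem.Chars.isupper c || c == ' ' || c == '-' then
      updateWordLoopA rest (new ++ PySem.Str.lower (String.ofList [c]))
    else new

def update_word (res : List String) : String :=
  match res with
  | [] => ""              -- Python raises IndexError here; excluded by Pre_
  | s :: _ => updateWordLoopA s.toList ""

-- ===== PORT B =====
-- B's staged computation: stop = index of the first rejected character (default len(w)),
-- then one bulk w[:stop].lower(). List.findIdx is exactly next(... , len(w)) over enumerate.
def update_word_alt (res : List String) : String :=
  match res with
  | [] => ""              -- Python raises IndexError here; excluded by Pre_
  | w :: _ =>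
    let cs := w.toList
    let stop := cs.findIdx (fun c => !(PySem.Chars.isupper c || c == ' ' || c == '-'))
    PySem.Str.lower (String.ofList (cs.take stop))

-- ===== PRECONDITION & SPEC =====
-- Pre_ excludes only the empty list, on which Python A raises IndexError (res[0]).
def Pre_update_word (res : List String) : Prop := res ≠ []
instance (res : List String) : Decidable (Pre_update_word res) := by unfold Pre_update_word; infer_instance
def pvWitness_update_word : List String := ["Ab-C du"]

def Spec_update_word (res : List String) (out : String) : Prop := out = update_word_alt res
instance (res : List String) (out : String) : Decidable (Spec_update_word res out) := by unfold Spec_update_word; infer_instance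

-- ===== CLAIM (what is proved, stated in full; the proofs are below) =====
def Claim_equal_update_word : Prop := ∀ (res : List String), Dom_update_word res → Pre_update_word res → Spec_update_word res (update_word res)

-- ===== LEMMAS AND PROOFS =====

theorem updateWordLoopA_eq (cs : List Char) (acc : String) :
    updateWordLoopA cs acc =
      acc ++ PySem.Str.lower (String.ofList
        (cs.take (cs.findIdx (fun c => !(PySem.Chars.isupper c || c == ' ' || c == '-'))))) := by
  induction cs generalizing acc with
  | nil => simp [updateWordLoopA, PySem.Str.lower, PySem.Chars.lower]
  | cons c rest ih =>
    by_cases h : (PySem.Chars.isupper c || c == ' ' || c == '-') = true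
    · rw [updateWordLoopA, if_pos h, ih]
      rw [List.findIdx_cons]
      simp only [h]
      apply String.ext
      simp [PySem.Str.lower, PySem.Chars.lower]
    · rw [updateWordLoopA, if_neg h]
      rw [List.findIdx_cons]
      simp only [Bool.not_eq_true] at h
      simp [h, PySem.Str.lower, PySem.Chars.lower]

-- ===== VERDICT (by name: the statement is the Claim_ definition above) =====
theorem update_word_spec : Claim_equal_update_word := by
  intro res _ hpre
  unfold Spec_update_word
  match res with
  | [] => exact absurd rfl hpre
  | s :: rest =>
    simp [update_word, update_word_alt, updateWordLoopA_eq]
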